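-- pv_equiv track=rewrite | github.com/MoXiao528/AIDetector-Back | backend/app/api/v1/detections.py | _normalize_detection_functions
-- ===== SOURCE A (Python) =====
-- SUPPORTED_DETECTION_FUNCTIONS = {"scan"}
--
-- def _normalize_detection_functions(functions: list[str] | None) -> set[str]:
--     normalized = {
--         item.strip().lower()
--         for item in (functions or [])
--         if isinstance(item, str) and item.strip()
--     }
--     supported = normalized & SUPPORTED_DETECTION_FUNCTIONS
--     supported.add("scan")
--     return supported
-- ===== SOURCE B (Python) =====
-- SUPPORTED_DETECTION_FUNCTIONS = {"scan"}
--
-- def _normalize_detection_functions(functions: list[str] | None) -> set[str]: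
--     # The intersection with {"scan"} followed by adding "scan" makes the
--     # result the constant {"scan"} regardless of the input.
--     return {"scan"}
-- ===== Notes on version B (the rewrite author's own statement) =====
-- stated objective: simpler
-- what changed: B drops the set comprehension and intersection entirely: since the normalized set is intersected with {"scan"} and "scan" is then unconditionally added, the result is always exactly {"scan"}, so B returns that fresh set literal directly.
import Mathlib
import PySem

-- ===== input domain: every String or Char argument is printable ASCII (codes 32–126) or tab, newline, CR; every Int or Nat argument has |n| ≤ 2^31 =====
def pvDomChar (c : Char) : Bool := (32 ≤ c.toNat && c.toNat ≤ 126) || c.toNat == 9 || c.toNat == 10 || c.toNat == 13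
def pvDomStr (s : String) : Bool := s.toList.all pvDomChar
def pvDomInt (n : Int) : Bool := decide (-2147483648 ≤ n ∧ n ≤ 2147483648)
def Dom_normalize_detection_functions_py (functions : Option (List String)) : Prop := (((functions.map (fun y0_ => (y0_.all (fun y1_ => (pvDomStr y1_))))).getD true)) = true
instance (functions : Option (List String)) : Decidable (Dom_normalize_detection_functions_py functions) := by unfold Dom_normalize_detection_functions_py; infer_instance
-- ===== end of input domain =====

-- B returns the constant set {"scan"}: A's intersection with {"scan"} plus the unconditional add makes its result constant.

-- ===== PORT A =====
-- SUPPORTED_DETECTION_FUNCTIONS = {"scan"}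
def SUPPORTED_DETECTION_FUNCTIONS : PySem.Set String := PySem.Set.ofList ["scan"]

def normalize_detection_functions_py (functions : Option (List String)) : List String :=
  -- `functions or []`
  let items : List String :=
    match functions with
    | some l => if l.isEmpty then [] else l
    | none => []
  -- set comprehension: {item.strip().lower() for item in items if isinstance(item, str) and item.strip()}
  -- (isinstance(item, str) is always True under the type convention)
  let normalized : PySem.Set String :=
    items.foldl
      (fun s item =>
        if PySem.Str.strip item ≠ "" then
          PySem.Set.add s (PySem.Str.lower (PySem.Str.strip item))
        else s)
      PySem.Set.empty
  let supported : PySem.Set String := PySem.Set.inter normalized SUPPORTED_DETECTION_FUNCTIONS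
  PySem.Set.add supported "scan"

-- ===== PORT B =====
def normalize_detection_functions_py_alt (functions : Option (List String)) : List String :=
  ["scan"]

-- ===== PRECONDITION & SPEC =====
def Spec_normalize_detection_functions_py (functions : Option (List String)) (out : List String) : Prop := out = normalize_detection_functions_py_alt functions
instance (functions : Option (List String)) (out : List String) : Decidable (Spec_normalize_detection_functions_py functions out) := by unfold Spec_normalize_detection_functions_py; infer_instance

-- ===== CLAIM (what is proved, stated in full; the proofs are below) =====
def Claim_equal_normalize_detection_functions_py : Prop := ∀ (functions : Option (List String)), Dom_normalize_detection_functions_py functions → Spec_normalize_detection_functions_py functions (normalize_detection_functions_py functions)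

-- ===== LEMMAS AND PROOFS =====

-- The accumulator of A's set-comprehension fold stays duplicate-free.
lemma nodup_norm_foldl (items : List String) (s : List String) (h : s.Nodup) :
    (items.foldl
      (fun s item =>
        if PySem.Str.strip item ≠ "" then
          PySem.Set.add s (PySem.Str.lower (PySem.Str.strip item))
        else s)
      s).Nodup := by
  induction items generalizing s with
  | nil => exact h
  | cons a t ih =>
    simp only [List.foldl_cons]
    apply ih
    split
    · simp only [PySem.Set.add, PySem.Set.contains]
      split
      · exact h
      · rename_i hc
        simp only [List.contains_eq_mem, decide_eq_true_eq] at hc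
        refine List.Nodup.append h (by simp) ?_
        intro y hy hz
        simp only [List.mem_singleton] at hz
        subst hz
        exact hc hy
    · exact h

-- On a duplicate-free set, intersecting with {"scan"} and then adding "scan" yields exactly ["scan"].
lemma add_scan_inter (s : List String) (h : s.Nodup) :
    PySem.Set.add (PySem.Set.inter s (PySem.Set.ofList ["scan"])) "scan" = ["scan"] := by
  induction s with
  | nil => decide
  | cons a t ih =>
    have ht : t.Nodup := h.of_cons
    have ha : a ∉ t := by
      intro hm; exact (List.nodup_cons.mp h).1 hm
    by_cases hs : a = "scan"
    · subst hs
      have hfil : t.filter (fun x => (PySem.Set.ofList ["scan"]).contains x) = [] := by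
        apply List.filter_eq_nil_iff.mpr
        intro x hx
        have : (PySem.Set.ofList ["scan"]) = ["scan"] := by decide
        rw [this]
        simp only [PySem.Set.contains, List.contains_eq_mem, List.mem_singleton,
          decide_eq_true_eq]
        intro he; exact ha (he ▸ hx)
      simp only [PySem.Set.inter, List.filter_cons]
      have hcs : (PySem.Set.ofList ["scan"]).contains "scan" = true := by decide
      rw [hcs]
      simp only [if_true, hfil]
      simp [PySem.Set.add, PySem.Set.contains]
    · have : PySem.Set.inter (a :: t) (PySem.Set.ofList ["scan"]) =
          PySem.Set.inter t (PySem.Set.ofList ["scan"]) := by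
        simp only [PySem.Set.inter, List.filter_cons]
        split
        · rename_i hc
          exfalso
          simp only [PySem.Set.ofList, PySem.Set.contains, List.foldl, PySem.Set.add] at hc
          simp only [List.contains_eq_mem, decide_eq_true_eq] at hc
          exact hs (by simpa using hc)
        · rfl
      rw [this]
      exact ih ht

-- ===== VERDICT (by name: the statement is the Claim_ definition above) =====
theorem normalize_detection_functions_py_spec : Claim_equal_normalize_detection_functions_py := by
  intro functions _
  unfold Spec_normalize_detection_functions_py normalize_detection_functions_py
    normalize_detection_functions_py_alt SUPPORTED_DETECTION_FUNCTIONS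
  apply add_scan_inter
  apply nodup_norm_foldl
  exact List.nodup_nil
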